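-- pv_equiv track=rewrite | github.com/Jerrytd579/CS115 | CS115b/musicrecplus.py | mostPopularArtists
-- ===== SOURCE A (Python) =====
-- def mostPopularArtists(userMap):
--     '''Returns the most popular artist or artists'''
--     users = userMap.keys()
--     Freqs = {}
--     maxlikes = 0
--     mostpop = []
--     for user in users:
--         if user[-1] != '$':
--             for artist in userMap[user]:
--                 if artist in Freqs:
--                     popularity_count = Freqs[artist]
--                     popularity_count += 1
--                     Freqs[artist] = popularity_count
--                 else:
--                     Freqs[artist] = 1
--     for artist in Freqs:
--         if Freqs[artist] > maxlikes:
--             maxlikes = Freqs[artist]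
--
--     for artist in Freqs:
--         if Freqs[artist] == maxlikes:
--             mostpop += [artist]
--     return mostpop
-- ===== SOURCE B (Python) =====
-- def mostPopularArtists(userMap):
--     '''Returns the most popular artist or artists'''
--     plays = []
--     for user in userMap:
--         if user[-1] != '$':
--             plays += userMap[user]
--     best = 0
--     mostpop = []
--     for artist in plays:
--         c = plays.count(artist)
--         if c > best:
--             best = c
--             mostpop = [artist]
--         elif c == best and artist not in mostpop:
--             mostpop.append(artist)
--     return mostpop
-- ===== Notes on version B (the rewrite author's own statement) =====
-- stated objective: alternative
-- what changed: Drops A's frequency dictionary entirely: B flattens all liked artists into one list and runs a single scan that maintains the running maximum and the winner list online, computing each artist's popularity with list.count instead of a counting dict followed by a max scan and a collect scan.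
import Mathlib
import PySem

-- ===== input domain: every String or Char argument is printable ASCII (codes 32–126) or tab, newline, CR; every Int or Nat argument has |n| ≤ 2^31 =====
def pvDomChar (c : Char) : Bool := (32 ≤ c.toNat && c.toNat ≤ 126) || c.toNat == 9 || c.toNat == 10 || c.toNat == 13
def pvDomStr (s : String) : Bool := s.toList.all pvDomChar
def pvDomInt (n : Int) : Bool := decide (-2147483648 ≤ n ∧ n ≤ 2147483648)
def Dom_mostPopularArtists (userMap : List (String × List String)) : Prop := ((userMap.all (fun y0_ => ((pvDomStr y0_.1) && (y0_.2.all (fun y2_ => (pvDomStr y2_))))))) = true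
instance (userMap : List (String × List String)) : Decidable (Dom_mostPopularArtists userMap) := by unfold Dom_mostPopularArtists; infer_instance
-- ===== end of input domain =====

-- B drops A's frequency dict: it flattens the liked artists into one list and keeps the running max and winner list in a single online scan using list.count; alternative decomposition, not faster.


-- ===== PORT A =====
def mostPopularArtists (userMap : List (String × List String)) : List String :=
  let d : PySem.Dict String (List String) := PySem.Dict.ofList userMap
  let Freqs : PySem.Dict String Int :=
    d.keys.foldl (fun F user =>
      if PySem.Str.pyGet? user (-1) ≠ some '$' then
        (d.getD user []).foldl (fun F artist =>
          if F.contains artist then F.insert artist (F.getD artist 0 + 1)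
          else F.insert artist 1) F
      else F) PySem.Dict.empty
  let maxlikes : Int :=
    Freqs.keys.foldl (fun m a => if Freqs.getD a 0 > m then Freqs.getD a 0 else m) 0
  Freqs.keys.foldl (fun acc a => if Freqs.getD a 0 = maxlikes then acc ++ [a] else acc) []

-- ===== PORT B =====
def mostPopularArtists_alt (userMap : List (String × List String)) : List String :=
  let d : PySem.Dict String (List String) := PySem.Dict.ofList userMap
  let plays : List String :=
    d.keys.foldl (fun acc user =>
      if PySem.Str.pyGet? user (-1) ≠ some '$' then acc ++ d.getD user [] else acc) []
  (plays.foldl (fun st artist =>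
      let c : Int := (PySem.List.count plays artist : Int)
      if c > st.1 then (c, [artist])
      else if c = st.1 ∧ artist ∉ st.2 then (st.1, st.2 ++ [artist])
      else st) ((0 : Int), ([] : List String))).2

-- ===== PRECONDITION & SPEC =====
-- Pre_ excludes user maps containing an empty-string key: there Python A raises IndexError evaluating user[-1] (B raises there too).
def Pre_mostPopularArtists (userMap : List (String × List String)) : Prop :=
  ∀ p ∈ userMap, p.1 ≠ ""
instance (userMap : List (String × List String)) : Decidable (Pre_mostPopularArtists userMap) := by
  unfold Pre_mostPopularArtists; infer_instance
def pvWitness_mostPopularArtists : (List (String × List String)) :=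
  [("u", ["x", "y"]), ("v$", ["x"]), ("w", ["y"])]
def Spec_mostPopularArtists (userMap : List (String × List String)) (out : List String) : Prop := out = mostPopularArtists_alt userMap
instance (userMap : List (String × List String)) (out : List String) : Decidable (Spec_mostPopularArtists userMap out) := by unfold Spec_mostPopularArtists; infer_instance

-- ===== CLAIM (what is proved, stated in full; the proofs are below) =====
def Claim_equal_mostPopularArtists : Prop := ∀ (userMap : List (String × List String)), Dom_mostPopularArtists userMap → Pre_mostPopularArtists userMap → Spec_mostPopularArtists userMap (mostPopularArtists userMap)

-- ===== LEMMAS AND PROOFS =====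

-- A's counting step with the contains-test is the plain counter-insert step
lemma freqs_eq (d : PySem.Dict String (List String)) :
    (d.keys.foldl (fun F user =>
      if PySem.Str.pyGet? user (-1) ≠ some '$' then
        (d.getD user []).foldl (fun F artist =>
          if F.contains artist then F.insert artist (F.getD artist 0 + 1)
          else F.insert artist 1) F
      else F) (PySem.Dict.empty : PySem.Dict String Int))
    = (d.keys.foldl (fun F user =>
      if PySem.Str.pyGet? user (-1) ≠ some '$' then
        (d.getD user []).foldl (fun F artist => F.insert artist (F.getD artist 0 + 1)) F
      else F) PySem.Dict.empty) := by
  have hstep : (fun (F : PySem.Dict String Int) (artist : String) =>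
      if F.contains artist then F.insert artist (F.getD artist 0 + 1) else F.insert artist 1)
    = fun F artist => F.insert artist (F.getD artist 0 + 1) := by
    funext F a
    by_cases h : F.contains a = true
    · simp [h]
    · simp only [Bool.not_eq_true] at h
      simp [h, PySem.Dict.getD_of_not_contains F (0 : Int) h]
  rw [hstep]

-- the flattening loop with any start accumulator
lemma flatten_acc {α β : Type} (cond : α → Prop) [DecidablePred cond] (g : α → List β) :
    ∀ (t : List α) (init : List β),
      t.foldl (fun acc u => if cond u then acc ++ g u else acc) init
      = init ++ t.foldl (fun acc u => if cond u then acc ++ g u else acc) [] := by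
  intro t
  induction t with
  | nil => simp
  | cons u t ih =>
    intro init
    simp only [List.foldl_cons]
    by_cases h : cond u
    · rw [if_pos h, if_pos h, ih (init ++ g u), ih ([] ++ g u), List.append_assoc]
      simp
    · rw [if_neg h, if_neg h]
      exact ih init

-- A's per-user inner counting fold equals one counting fold over the flattened plays list
lemma fuse {α β γ : Type} (cond : α → Prop) [DecidablePred cond] (g : α → List β) (ins : γ → β → γ) :
    ∀ (t : List α) (F : γ),
      t.foldl (fun F u => if cond u then (g u).foldl ins F else F) F
      = (t.foldl (fun acc u => if cond u then acc ++ g u else acc) []).foldl ins F := by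
  intro t
  induction t with
  | nil => intro F; rfl
  | cons u t ih =>
    intro F
    simp only [List.foldl_cons]
    by_cases h : cond u
    · rw [if_pos h, if_pos h, ih, flatten_acc cond g t ([] ++ g u)]
      simp [List.foldl_append]
    · rw [if_neg h, if_neg h, ih]

-- the running-max loop written with an if is the max fold
lemma mfold_eq_max (cnt : String → Int) (q : List String) :
    q.foldl (fun m a => if cnt a > m then cnt a else m) 0
    = q.foldl (fun m a => max m (cnt a)) 0 := by
  have h : (fun (m : Int) a => if cnt a > m then cnt a else m) = fun m a => max m (cnt a) := by
    funext m a
    simp only [max_def]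
    split_ifs <;> omega
  rw [h]

lemma mfold_le (cnt : String → Int) (q : List String) :
    0 ≤ q.foldl (fun m a => if cnt a > m then cnt a else m) 0 ∧
    ∀ x ∈ q, cnt x ≤ q.foldl (fun m a => if cnt a > m then cnt a else m) 0 := by
  rw [mfold_eq_max]
  exact PySem.List.le_foldl_max_int q cnt 0

lemma mfold_mem (cnt : String → Int) (q : List String) :
    q.foldl (fun m a => if cnt a > m then cnt a else m) 0 = 0 ∨
    ∃ x ∈ q, q.foldl (fun m a => if cnt a > m then cnt a else m) 0 = cnt x := by
  rw [mfold_eq_max, ← List.foldl_map]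
  rcases PySem.List.foldl_max_mem (q.map cnt) (0 : Int) with h | h
  · exact Or.inl h
  · rcases List.mem_map.1 h with ⟨x, hx, hfx⟩
    exact Or.inr ⟨x, hx, hfx.symm⟩

-- the max over the deduplicated list is the max over the list
lemma mfold_dedup (cnt : String → Int) (q : List String) :
    (PySem.Set.ofList q).foldl (fun m a => if cnt a > m then cnt a else m) 0
    = q.foldl (fun m a => if cnt a > m then cnt a else m) 0 := by
  apply le_antisymm
  · rcases mfold_mem cnt (PySem.Set.ofList q) with h | ⟨x, hx, hx'⟩
    · rw [h]; exact (mfold_le cnt q).1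
    · rw [hx']
      exact (mfold_le cnt q).2 x ((PySem.Set.mem_ofList q x).1 hx)
  · rcases mfold_mem cnt q with h | ⟨x, hx, hx'⟩
    · rw [h]; exact (mfold_le cnt (PySem.Set.ofList q)).1
    · rw [hx']
      exact (mfold_le cnt (PySem.Set.ofList q)).2 x ((PySem.Set.mem_ofList q x).2 hx)

-- ofList over an appended element
lemma ofList_append_singleton {α : Type} [BEq α] [LawfulBEq α] (q : List α) (a : α) :
    PySem.Set.ofList (q ++ [a])
    = if a ∈ q then PySem.Set.ofList q else PySem.Set.ofList q ++ [a] := by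
  rw [PySem.Set.ofList_eq_foldl, List.foldl_append, ← PySem.Set.ofList_eq_foldl]
  simp only [List.foldl_cons, List.foldl_nil, PySem.Set.add]
  by_cases h : a ∈ q
  · rw [if_pos ((PySem.Set.contains_iff _ _).2 ((PySem.Set.mem_ofList q a).2 h)), if_pos h]
  · rw [if_neg (fun hc => h ((PySem.Set.mem_ofList q a).1 ((PySem.Set.contains_iff _ _).1 hc))),
        if_neg h]

-- THE HEART: B's online scan computes the max count and the filter of first occurrences with that count
lemma b_loop (cnt : String → Int) (q : List String) :
    q.foldl (fun st a =>
        if cnt a > st.1 then (cnt a, [a])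
        else if cnt a = st.1 ∧ a ∉ st.2 then (st.1, st.2 ++ [a])
        else st) ((0 : Int), ([] : List String))
    = (q.foldl (fun m a => if cnt a > m then cnt a else m) 0,
       (PySem.Set.ofList q).filter
         (fun a => decide (cnt a = q.foldl (fun m a => if cnt a > m then cnt a else m) 0))) := by
  induction q using List.reverseRecOn with
  | nil => rfl
  | append_singleton q a ih =>
    rw [List.foldl_append, List.foldl_append, ih]
    have hM := mfold_le cnt q
    set M := q.foldl (fun m a => if cnt a > m then cnt a else m) 0 with hMdef
    simp only [List.foldl_cons, List.foldl_nil]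
    rw [ofList_append_singleton]
    by_cases h1 : cnt a > M
    · -- new strict maximum: the winner list restarts at [a]
      have hanq : a ∉ q := fun hc => absurd (hM.2 a hc) (by omega)
      have hfq : (PySem.Set.ofList q).filter (fun x => decide (cnt x = cnt a)) = [] := by
        apply List.filter_eq_nil_iff.2
        intro x hx
        have := hM.2 x ((PySem.Set.mem_ofList q x).1 hx)
        simp only [decide_eq_true_eq]
        omega
      simp only [if_pos h1, if_neg hanq, List.filter_append]
      simp [hfq]
    · simp only [if_neg h1]
      by_cases h2 : cnt a = M ∧ a ∉ (PySem.Set.ofList q).filter (fun x => decide (cnt x = M))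
      · -- ties the maximum, not yet collected: appended
        have hanq : a ∉ q := fun hc =>
          h2.2 (List.mem_filter.2 ⟨(PySem.Set.mem_ofList q a).2 hc, by simp [h2.1]⟩)
        simp only [if_pos h2, if_neg hanq, List.filter_append]
        simp [h2.1]
      · -- no change
        simp only [if_neg h2]
        by_cases h3 : a ∈ q
        · simp only [if_pos h3]
        · have hne : cnt a ≠ M := fun hc =>
            h2 ⟨hc, fun hmem => h3 ((PySem.Set.mem_ofList q a).1 (List.mem_filter.1 hmem).1)⟩
          simp only [if_neg h3, List.filter_append]
          simp [hne]

-- both tails agree: A's max-scan + collect over the distinct artists equals B's online scan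
lemma main (plays : List String) :
    (PySem.Set.ofList plays).foldl (fun acc a =>
        if ((List.count a plays : Nat) : Int)
            = (PySem.Set.ofList plays).foldl (fun m a =>
                if ((List.count a plays : Nat) : Int) > m then ((List.count a plays : Nat) : Int) else m) 0
        then acc ++ [a] else acc) []
    = (plays.foldl (fun st a =>
        if ((List.count a plays : Nat) : Int) > st.1 then (((List.count a plays : Nat) : Int), [a])
        else if ((List.count a plays : Nat) : Int) = st.1 ∧ a ∉ st.2 then (st.1, st.2 ++ [a])
        else st) ((0 : Int), ([] : List String))).2 := by
  rw [b_loop (fun a => ((List.count a plays : Nat) : Int)) plays]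
  rw [PySem.List.foldl_append_ite_eq_filter]
  simp only [mfold_dedup (fun a => ((List.count a plays : Nat) : Int)) plays]
  simp

-- ===== VERDICT (by name: the statement is the Claim_ definition above) =====
theorem mostPopularArtists_spec : Claim_equal_mostPopularArtists := by
  intro userMap _ _
  unfold Spec_mostPopularArtists mostPopularArtists mostPopularArtists_alt
  simp only [freqs_eq]
  rw [fuse (fun user => PySem.Str.pyGet? user (-1) ≠ some '$')
        (fun user => (PySem.Dict.ofList userMap).getD user [])
        (fun (F : PySem.Dict String Int) artist => F.insert artist (F.getD artist 0 + 1))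
        (PySem.Dict.ofList userMap).keys PySem.Dict.empty]
  set plays := (PySem.Dict.ofList userMap).keys.foldl
      (fun acc user =>
        if PySem.Str.pyGet? user (-1) ≠ some '$' then acc ++ (PySem.Dict.ofList userMap).getD user []
        else acc) [] with hplays
  rw [PySem.Dict.foldl_insert_getD_add_one_eq_counter]
  simp only [PySem.Dict.getD_counter, PySem.Dict.keys_counter, PySem.List.count_eq]
  exact main plays
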